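-- pv_equiv track=rewrite | github.com/PavelBlindheim/HackRF_AIS_attacks | Spray_spoofing/attacker.py | ascii_to_6bit_binary
-- ===== SOURCE A (Python) =====
-- def ascii_to_6bit_binary(ascii_string):
--     ascii_table = {
--         '0': 0, '1': 1, '2': 2, '3': 3, '4': 4, '5': 5, '6': 6, '7': 7,
--         '8': 8, '9': 9, ':': 10, ';': 11, '<': 12, '=': 13, '>': 14, '?': 15,
--         '@': 16, 'A': 17, 'B': 18, 'C': 19, 'D': 20, 'E': 21, 'F': 22, 'G': 23,
--         'H': 24, 'I': 25, 'J': 26, 'K': 27, 'L': 28, 'M': 29, 'N': 30, 'O': 31,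
--         'P': 32, 'Q': 33, 'R': 34, 'S': 35, 'T': 36, 'U': 37, 'V': 38, 'W': 39,
--         '`': 40, 'a': 41, 'b': 42, 'c': 43, 'd': 44, 'e': 45, 'f': 46, 'g': 47,
--         'h': 48, 'i': 49, 'j': 50, 'k': 51, 'l': 52, 'm': 53, 'n': 54, 'o': 55,
--         'p': 56, 'q': 57, 'r': 58, 's': 59, 't': 60, 'u': 61, 'v': 62, 'w': 63
--     }
--     binary_string = ''.join(format(ascii_table[char], '06b') for char in ascii_string)
--     return binary_string
-- ===== SOURCE B (Python) =====
-- def ascii_to_6bit_binary(ascii_string):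
--     # Divide and conquer: compute the whole payload as ONE big integer --
--     # each half's value combined as (left << 6*len(right)) + right -- then
--     # render it with a single zero-padded binary format of width 6*len.
--     if not ascii_string:
--         return ''
--
--     def value(lo, hi):
--         if hi - lo == 1:
--             n = ord(ascii_string[lo])
--             if 48 <= n <= 87:
--                 return n - 48
--             if 96 <= n <= 119:
--                 return n - 56
--             raise KeyError(ascii_string[lo])
--         mid = (lo + hi) // 2
--         return (value(lo, mid) << (6 * (hi - mid))) + value(mid, hi)
--
--     return format(value(0, len(ascii_string)), '0%db' % (6 * len(ascii_string)))
-- ===== Notes on version B (the rewrite author's own statement) =====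
-- stated objective: alternative
-- what changed: Instead of formatting each character to its own 6-bit string and joining, B computes the whole payload as one big integer by divide and conquer -- the two halves' values are combined as (left << 6*len(right)) + right, each leaf value computed arithmetically from ord with no table -- and renders it with a single zero-padded binary format of width 6*len; it raises KeyError on the same out-of-alphabet characters A does, which Pre_ excludes.
-- outside the precondition, e.g. on ascii_to_6bit_binary(' '): A raises KeyError, B raises KeyError
import Mathlib
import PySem

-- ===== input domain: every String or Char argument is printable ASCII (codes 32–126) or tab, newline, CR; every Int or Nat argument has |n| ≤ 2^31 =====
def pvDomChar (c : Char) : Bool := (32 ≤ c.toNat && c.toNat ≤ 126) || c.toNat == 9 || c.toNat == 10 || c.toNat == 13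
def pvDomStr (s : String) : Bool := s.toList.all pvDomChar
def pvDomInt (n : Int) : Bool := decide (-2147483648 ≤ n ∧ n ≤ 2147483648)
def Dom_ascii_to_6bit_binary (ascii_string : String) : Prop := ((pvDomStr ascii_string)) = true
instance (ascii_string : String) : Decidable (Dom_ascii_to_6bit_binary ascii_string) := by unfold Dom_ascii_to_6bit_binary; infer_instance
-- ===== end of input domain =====

-- B computes the payload as ONE big integer by divide and conquer ((left << 6*len(right)) + right) and renders it with a single width-(6*len) binary format, instead of A's per-character table lookup + per-character 6-bit format + join (alternative algorithm).


-- format(n, '0<w>b') for n ≥ 0: zero-pad the binary digits (PySem.Int.toBinChars) to width w; exact there.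
def pvFormatBin (n w : Nat) : List Char :=
  List.replicate (w - (PySem.Int.toBinChars (n : Int)).length) '0' ++ PySem.Int.toBinChars (n : Int)

-- ===== PORT A =====
def pvAsciiTable : PySem.Dict Char Int :=
  PySem.Dict.ofList [('0', 0), ('1', 1), ('2', 2), ('3', 3), ('4', 4), ('5', 5), ('6', 6), ('7', 7), ('8', 8), ('9', 9), (':', 10), (';', 11), ('<', 12), ('=', 13), ('>', 14), ('?', 15), ('@', 16), ('A', 17), ('B', 18), ('C', 19), ('D', 20), ('E', 21), ('F', 22), ('G', 23), ('H', 24), ('I', 25), ('J', 26), ('K', 27), ('L', 28), ('M', 29), ('N', 30), ('O', 31), ('P', 32), ('Q', 33), ('R', 34), ('S', 35), ('T', 36), ('U', 37), ('V', 38), ('W', 39), ('`', 40), ('a', 41), ('b', 42), ('c', 43), ('d', 44), ('e', 45), ('f', 46), ('g', 47), ('h', 48), ('i', 49), ('j', 50), ('k', 51), ('l', 52), ('m', 53), ('n', 54), ('o', 55), ('p', 56), ('q', 57), ('r', 58), ('s', 59), ('t', 60), ('u', 61), ('v', 62), ('w', 63)]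

def ascii_to_6bit_binary (ascii_string : String) : String :=
  String.ofList ((ascii_string.toList.map (fun char =>
    match pvAsciiTable.get? char with
    | some v => pvFormatBin v.toNat 6
    | none => [])).flatten)   -- Python raises KeyError here; excluded by Pre_

-- ===== PORT B =====
-- B's inner value(lo, hi): the slice is passed as its character list; mid = (lo+hi)//2 splits it at length/2
def pvValue (cs : List Char) : Nat :=
  if h1 : cs.length ≤ 1 then
    match cs with
    | [] => 0   -- unreachable: B only recurses into nonempty slices
    | c :: _ =>
      let n := c.toNat
      if 48 ≤ n ∧ n ≤ 87 then n - 48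
      else if 96 ≤ n ∧ n ≤ 119 then n - 56
      else 0   -- Python raises KeyError here; excluded by Pre_
  else
    (pvValue (cs.take (cs.length / 2)) <<< (6 * (cs.length - cs.length / 2))) +
      pvValue (cs.drop (cs.length / 2))
termination_by cs.length
decreasing_by
  · simp only [List.length_take]; omega
  · simp only [List.length_drop]; omega

def ascii_to_6bit_binary_alt (ascii_string : String) : String :=
  if ascii_string.toList = [] then "" else
  String.ofList (pvFormatBin (pvValue ascii_string.toList) (6 * ascii_string.toList.length))

-- ===== PRECONDITION & SPEC =====
-- Pre_: every character is in A's 64-entry table ('0'..'W' or '`'..'w'); elsewhere both Pythons raise KeyError.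
def Pre_ascii_to_6bit_binary (ascii_string : String) : Prop :=
  (ascii_string.toList.all (fun c =>
    (48 ≤ c.toNat && c.toNat ≤ 87) || (96 ≤ c.toNat && c.toNat ≤ 119))) = true
instance (ascii_string : String) : Decidable (Pre_ascii_to_6bit_binary ascii_string) := by
  unfold Pre_ascii_to_6bit_binary; infer_instance
def pvWitness_ascii_to_6bit_binary : String := "Hello5tw`"

def Spec_ascii_to_6bit_binary (ascii_string : String) (out : String) : Prop := out = ascii_to_6bit_binary_alt ascii_string
instance (ascii_string : String) (out : String) : Decidable (Spec_ascii_to_6bit_binary ascii_string out) := by unfold Spec_ascii_to_6bit_binary; infer_instance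

-- ===== CLAIM (what is proved, stated in full; the proofs are below) =====
def Claim_equal_ascii_to_6bit_binary : Prop := ∀ (ascii_string : String), Dom_ascii_to_6bit_binary ascii_string → Pre_ascii_to_6bit_binary ascii_string → Spec_ascii_to_6bit_binary ascii_string (ascii_to_6bit_binary ascii_string)

-- ===== LEMMAS AND PROOFS =====

-- binary digits of a positive number, most significant first (pvBits 0 = [])
def pvBits (n : Nat) : List Char :=
  if h : n = 0 then [] else pvBits (n / 2) ++ [Nat.digitChar (n % 2)]
decreasing_by exact Nat.div_lt_self (Nat.pos_of_ne_zero h) (by norm_num)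

-- the k-bit zero-padded binary of u (< 2^k), most significant first
def pvPad (k u : Nat) : List Char :=
  (List.range k).map (fun i => Nat.digitChar (u / 2 ^ (k - 1 - i) % 2))

theorem pvToDigitsCore_eq (fuel n : Nat) (acc : List Char) (h : n < fuel) :
    Nat.toDigitsCore 2 fuel n acc = (if n = 0 then ['0'] else pvBits n) ++ acc := by
  induction fuel generalizing n acc with
  | zero => omega
  | succ fuel ih =>
    rw [Nat.toDigitsCore]
    by_cases h0 : n / 2 = 0
    · simp only [h0, if_pos]
      rcases Nat.lt_or_ge n 2 with h2 | h2
      · interval_cases n <;> simp [pvBits, Nat.digitChar]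
      · omega
    · rw [if_neg h0, ih _ _ (by omega), if_neg h0]
      conv_rhs => rw [pvBits]
      simp [show ¬ n = 0 by omega]

theorem pvToBinChars_natCast (n : Nat) :
    PySem.Int.toBinChars (n : Int) = if n = 0 then ['0'] else pvBits n := by
  have h : PySem.Int.toBinChars (n : Int) = Nat.toDigits 2 n := by
    simp [PySem.Int.toBinChars]
  rw [h, Nat.toDigits, pvToDigitsCore_eq _ _ _ (by omega), List.append_nil]

-- peeling one low bit off pvPad
theorem pvPad_succ (k u : Nat) :
    pvPad (k + 1) u = pvPad k (u / 2) ++ [Nat.digitChar (u % 2)] := by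
  unfold pvPad
  rw [List.range_succ, List.map_append]
  congr 1
  · apply List.map_congr_left
    intro i hi
    have hik : i < k := List.mem_range.mp hi
    have h1 : k + 1 - 1 - i = (k - 1 - i) + 1 := by omega
    rw [h1, pow_succ, Nat.mul_comm, ← Nat.div_div_eq_div_mul]
  · simp

theorem pvPad_length (k u : Nat) : (pvPad k u).length = k := by
  simp [pvPad]

-- shifting k bits: pvBits (a * 2^k + u) = pvBits a ++ pvPad k u for a > 0, u < 2^k
theorem pvBits_shift (k : Nat) : ∀ a u : Nat, 0 < a → u < 2 ^ k →
    pvBits (a * 2 ^ k + u) = pvBits a ++ pvPad k u := by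
  induction k with
  | zero =>
    intro a u ha hu
    have h0 : u = 0 := by omega
    simp [h0, pvPad]
  | succ k ih =>
    intro a u ha hu
    rw [pvPad_succ, pvBits]
    have hre : a * 2 ^ (k + 1) + u = (a * 2 ^ k) * 2 + u := by ring
    have hne : ¬ a * 2 ^ (k + 1) + u = 0 := by positivity
    have hb : 0 < a * 2 ^ k := by positivity
    rw [dif_neg hne]
    have hdiv : (a * 2 ^ (k + 1) + u) / 2 = a * 2 ^ k + u / 2 := by rw [hre]; omega
    have hmod : (a * 2 ^ (k + 1) + u) % 2 = u % 2 := by rw [hre]; omega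
    have hu2 : u / 2 < 2 ^ k := by
      have := hu; rw [pow_succ] at this; omega
    rw [hdiv, hmod, ih a (u / 2) ha hu2, List.append_assoc]

-- for small v the padded 6-bit format IS pvPad 6 v
theorem pvFormatBin_six (v : Nat) (hv : v < 64) : pvFormatBin v 6 = pvPad 6 v := by
  interval_cases v <;> decide

theorem pvBits_len_le (v : Nat) (hv : v < 64) (hv0 : 0 < v) : (pvBits v).length ≤ 6 := by
  have h := congrArg List.length (pvFormatBin_six v hv)
  rw [pvFormatBin, pvToBinChars_natCast, if_neg (by omega)] at h
  rw [List.length_append, List.length_replicate, pvPad_length] at h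
  omega

theorem pvFormatBin_zero (w : Nat) (hw : 1 ≤ w) : pvFormatBin 0 w = List.replicate w '0' := by
  rw [pvFormatBin, pvToBinChars_natCast, if_pos rfl, List.length_singleton]
  rw [show w = (w - 1) + 1 from by omega, List.replicate_succ']
  simp

-- KEY: appending one 6-bit block to a zero-padded binary rendering
theorem pvFormatBin_step (a v w : Nat) (hv : v < 64) (hw : 1 ≤ w) :
    pvFormatBin (a * 64 + v) (w + 6) = pvFormatBin a w ++ pvFormatBin v 6 := by
  rcases Nat.eq_zero_or_pos a with ha | ha
  · subst ha
    rw [Nat.zero_mul, Nat.zero_add, pvFormatBin_zero w hw]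
    rcases Nat.eq_zero_or_pos v with hv0 | hv0
    · subst hv0
      rw [pvFormatBin_zero 6 (by omega), pvFormatBin_zero (w + 6) (by omega), ← List.replicate_add]
    · have hlen := pvBits_len_le v hv hv0
      rw [pvFormatBin, pvFormatBin, pvToBinChars_natCast, if_neg (by omega)]
      rw [show w + 6 - (pvBits v).length = w + (6 - (pvBits v).length) from by omega,
        List.replicate_add, List.append_assoc]
  · have hbits : pvBits (a * 64 + v) = pvBits a ++ pvPad 6 v := by
      have h := pvBits_shift 6 a v ha (by norm_num; omega)
      rwa [show a * 2 ^ 6 + v = a * 64 + v from by norm_num] at h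
    rw [pvFormatBin, pvFormatBin, pvToBinChars_natCast, pvToBinChars_natCast,
      if_neg (by positivity), if_neg (by omega), hbits, pvFormatBin_six v hv,
      List.length_append, pvPad_length,
      show w + 6 - ((pvBits a).length + 6) = w - (pvBits a).length from by omega,
      List.append_assoc]

-- MAIN: rendering the base-64 fold of a nonempty block list equals the joined per-block renderings
theorem pvFold_format (vs : List Nat) (hne : vs ≠ [])
    (hlt : ∀ v ∈ vs, v < 64) :
    pvFormatBin (vs.foldl (fun a v => a * 64 + v) 0) (6 * vs.length) =
      (vs.map (fun v => pvFormatBin v 6)).flatten := by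
  induction vs using List.reverseRecOn with
  | nil => exact absurd rfl hne
  | append_singleton vs v ih =>
    rcases Nat.eq_zero_or_pos vs.length with h0 | hpos
    · rw [List.length_eq_zero_iff] at h0
      subst h0
      simp [pvFormatBin]
    · have hvs : vs ≠ [] := by
        intro h; rw [h] at hpos; simp at hpos
      have hlt' : ∀ u ∈ vs, u < 64 := fun u hu => hlt u (List.mem_append_left _ hu)
      have hv : v < 64 := hlt v (List.mem_append_right _ (List.mem_singleton_self v))
      rw [List.foldl_append, List.length_append, List.map_append, List.flatten_append]
      simp only [List.foldl_cons, List.foldl_nil, List.length_singleton, List.map_cons,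
        List.map_nil, List.flatten_cons, List.flatten_nil, List.append_nil]
      rw [show 6 * (vs.length + 1) = 6 * vs.length + 6 by ring,
        pvFormatBin_step _ v _ hv (by omega), ih hvs hlt']

-- the arithmetic value of a character in A's alphabet
def pvVal (c : Char) : Nat := if 48 ≤ c.toNat ∧ c.toNat ≤ 87 then c.toNat - 48 else c.toNat - 56

theorem pvVal_lt (c : Char)
    (h : ((48 ≤ c.toNat && c.toNat ≤ 87) || (96 ≤ c.toNat && c.toNat ≤ 119)) = true) :
    pvVal c < 64 := by
  unfold pvVal
  simp only [Bool.or_eq_true, Bool.and_eq_true, decide_eq_true_eq] at h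
  split_ifs <;> omega

-- continuing a base-64 fold from accumulator a
theorem pvNum_from (vs : List Nat) : ∀ a : Nat,
    vs.foldl (fun a v => a * 64 + v) a =
      a * 64 ^ vs.length + vs.foldl (fun a v => a * 64 + v) 0 := by
  induction vs with
  | nil => intro a; simp
  | cons v vs ih =>
    intro a
    simp only [List.foldl_cons, List.length_cons]
    rw [ih (a * 64 + v), ih (0 * 64 + v)]
    ring

theorem pvNum_append (xs ys : List Nat) :
    (xs ++ ys).foldl (fun a v => a * 64 + v) 0 =
      xs.foldl (fun a v => a * 64 + v) 0 * 64 ^ ys.length +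
        ys.foldl (fun a v => a * 64 + v) 0 := by
  rw [List.foldl_append, pvNum_from]

-- B's recursion computes exactly the base-64 fold of the character values
theorem pvValue_eq : ∀ (n : Nat) (cs : List Char), cs.length = n →
    (∀ c ∈ cs, ((48 ≤ c.toNat && c.toNat ≤ 87) || (96 ≤ c.toNat && c.toNat ≤ 119)) = true) →
    pvValue cs = (cs.map pvVal).foldl (fun a v => a * 64 + v) 0 := by
  intro n
  induction n using Nat.strong_induction_on with
  | _ n ih =>
    intro cs hlen hcs
    rw [pvValue]
    by_cases h1 : cs.length ≤ 1
    · rw [dif_pos h1]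
      match cs, h1 with
      | [], _ => rfl
      | [c], _ =>
        have h := hcs c (List.mem_singleton_self c)
        simp only [Bool.or_eq_true, Bool.and_eq_true, decide_eq_true_eq] at h
        simp only [List.map_cons, List.map_nil, List.foldl_cons, List.foldl_nil,
          Nat.zero_mul, Nat.zero_add]
        unfold pvVal
        split_ifs <;> omega
    · rw [dif_neg h1]
      have hlt : cs.length / 2 < n := by omega
      have hlt2 : cs.length - cs.length / 2 < n := by omega
      rw [ih _ (by rw [← hlen]; simpa [List.length_take] using by omega) _ rfl
            (fun c hc => hcs c (List.mem_of_mem_take hc)),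
          ih _ (by rw [← hlen]; simpa [List.length_drop] using by omega) _ rfl
            (fun c hc => hcs c (List.mem_of_mem_drop hc))]
      rw [Nat.shiftLeft_eq]
      conv_rhs => rw [← List.take_append_drop (cs.length / 2) cs]
      rw [List.map_append, pvNum_append, List.length_map, List.length_drop]
      congr 2
      rw [Nat.pow_mul]

-- A's per-character table lookup agrees with the arithmetic value (all 128 ASCII codes checked)
set_option maxRecDepth 8000 in
theorem pvTable_eq_ofNat (n : Nat) (hn : n < 128)
    (h : ((48 ≤ n && n ≤ 87) || (96 ≤ n && n ≤ 119)) = true) :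
    pvAsciiTable.get? (Char.ofNat n) = some ((if 48 ≤ n ∧ n ≤ 87 then n - 48 else n - 56 : Nat) : Int) := by
  revert h
  interval_cases n <;> decide

theorem pvTable_eq (c : Char)
    (h : ((48 ≤ c.toNat && c.toNat ≤ 87) || (96 ≤ c.toNat && c.toNat ≤ 119)) = true) :
    pvAsciiTable.get? c = some ((pvVal c : Nat) : Int) := by
  have hlt : c.toNat < 128 := by
    rcases Bool.or_eq_true_iff.mp h with h' | h' <;>
      simp only [Bool.and_eq_true, decide_eq_true_eq] at h' <;> omega
  have hc : Char.ofNat c.toNat = c := Char.ofNat_toNat c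
  have := pvTable_eq_ofNat c.toNat hlt (by simpa using h)
  rw [hc] at this
  rw [this]
  rfl

-- ===== VERDICT (by name: the statement is the Claim_ definition above) =====
theorem ascii_to_6bit_binary_spec : Claim_equal_ascii_to_6bit_binary := by
  intro s _ hpre
  unfold Spec_ascii_to_6bit_binary ascii_to_6bit_binary ascii_to_6bit_binary_alt
  unfold Pre_ascii_to_6bit_binary at hpre
  rw [List.all_eq_true] at hpre
  by_cases hnil : s.toList = []
  · rw [if_pos hnil, hnil]
    rfl
  · rw [if_neg hnil]
    -- B's divide-and-conquer big integer is the base-64 fold of the mapped values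
    have hfold : pvValue s.toList = (s.toList.map pvVal).foldl (fun a v => a * 64 + v) 0 :=
      pvValue_eq _ _ rfl hpre
    -- A's per-character blocks are the per-value renderings
    have hmap : s.toList.map (fun char =>
        match pvAsciiTable.get? char with
        | some v => pvFormatBin v.toNat 6
        | none => []) = (s.toList.map pvVal).map (fun v => pvFormatBin v 6) := by
      rw [List.map_map]
      apply List.map_congr_left
      intro c hc
      rw [Function.comp_apply, pvTable_eq c (hpre c hc)]
      simp
    have hne : s.toList.map pvVal ≠ [] := by simpa using hnil
    have hlt : ∀ v ∈ s.toList.map pvVal, v < 64 := by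
      intro v hv
      obtain ⟨c, hc, rfl⟩ := List.mem_map.mp hv
      exact pvVal_lt c (hpre c hc)
    rw [hmap, hfold, ← pvFold_format _ hne hlt]
    simp
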